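-- pv_equiv track=rewrite | github.com/Dhaaaf/Leetcoding | vanguardHackerRank/spamDetection.py | detect_spam
-- ===== SOURCE A (Python) =====
-- def detect_spam(subjects, spam_words):
--     # Convert spam words to lowercase to make comparison case-insensitive
--     spam_words = [word.lower() for word in spam_words]
--
--     # Initialize an empty list to store results
--     spam_detection_results = []
--
--     # Iterate over each subject
--     for subject in subjects:
--         # Convert subject to lowercase and split it into words
--         subject_words = subject.lower().split()
--
--         # Initialize counter for spam words
--         spam_counter = 0
--
--         # Iterate over each word in the subject
--         for word in subject_words:
--             # If the word is in the list of spam words, increment the counter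
--             if word in spam_words:
--                 spam_counter += 1
--
--             # If there are at least two spam words, mark the email as spam and break the loop
--             if spam_counter >= 2:
--                 spam_detection_results.append("spam")
--                 break
--
--         # If the loop completed without finding two spam words, mark the email as not spam
--         else:
--             spam_detection_results.append("not_spam")
--
--     # Return the list of spam detection results
--     return spam_detection_results
-- ===== SOURCE B (Python) =====
-- def detect_spam(subjects, spam_words):
--     spam_set = {w.lower() for w in spam_words}
--     results = []
--     for subject in subjects:
--         freq = {}
--         for w in subject.lower().split():
--             freq[w] = freq.get(w, 0) + 1
--         total = sum(freq.get(w, 0) for w in spam_set)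
--         results.append("spam" if total >= 2 else "not_spam")
--     return results
-- ===== Notes on version B (the rewrite author's own statement) =====
-- stated objective: alternative
-- what changed: B builds a per-subject word-frequency table once and sums counts over a deduplicated lowercased spam-word set, instead of A's per-word membership scan of the spam list with an early break.
import Mathlib
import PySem

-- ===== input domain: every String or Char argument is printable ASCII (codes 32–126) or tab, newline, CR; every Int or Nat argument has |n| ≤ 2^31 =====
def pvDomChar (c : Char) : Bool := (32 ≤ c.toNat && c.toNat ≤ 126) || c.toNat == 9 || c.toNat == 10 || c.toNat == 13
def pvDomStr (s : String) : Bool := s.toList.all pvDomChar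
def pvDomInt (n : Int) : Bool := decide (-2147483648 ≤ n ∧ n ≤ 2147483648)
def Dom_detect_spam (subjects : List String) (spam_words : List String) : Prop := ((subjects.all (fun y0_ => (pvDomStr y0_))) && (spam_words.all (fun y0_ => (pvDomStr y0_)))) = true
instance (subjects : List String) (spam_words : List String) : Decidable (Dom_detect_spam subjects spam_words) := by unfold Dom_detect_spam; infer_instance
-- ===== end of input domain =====

-- B replaces A's per-word membership scan (with early break) by a word-frequency table
-- summed over a deduplicated spam-word set; same results, different decomposition.

-- ===== PORT A =====
-- A's inner 'for word in subject_words' loop with its break / for-else.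
def pvInnerA (spamL : List String) : List String → Int → String
  | [], _ => "not_spam"
  | w :: ws, c =>
    let c' := if spamL.contains w then c + 1 else c
    if 2 ≤ c' then "spam" else pvInnerA spamL ws c'

def detect_spam (subjects : List String) (spam_words : List String) : List String :=
  let spamL := spam_words.map PySem.Str.lower
  subjects.foldl (fun acc subject =>
    acc ++ [pvInnerA spamL (PySem.Str.split₀ (PySem.Str.lower subject)) 0]) []

-- ===== PORT B =====
def detect_spam_alt (subjects : List String) (spam_words : List String) : List String :=
  let spamSet : PySem.Set String := PySem.Set.ofList (spam_words.map PySem.Str.lower)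
  subjects.foldl (fun acc subject =>
    let freq := (PySem.Str.split₀ (PySem.Str.lower subject)).foldl
        (fun d w => d.insert w (d.getD w 0 + 1)) (PySem.Dict.empty : PySem.Dict String Int)
    let total := (spamSet.map (fun w => freq.getD w 0)).sum
    acc ++ [if 2 ≤ total then "spam" else "not_spam"]) []

-- ===== PRECONDITION & SPEC =====
def Spec_detect_spam (subjects : List String) (spam_words : List String) (out : List String) : Prop := out = detect_spam_alt subjects spam_words
instance (subjects : List String) (spam_words : List String) (out : List String) : Decidable (Spec_detect_spam subjects spam_words out) := by unfold Spec_detect_spam; infer_instance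

-- ===== CLAIM (what is proved, stated in full; the proofs are below) =====
def Claim_equal_detect_spam : Prop := ∀ (subjects : List String) (spam_words : List String), Dom_detect_spam subjects spam_words → Spec_detect_spam subjects spam_words (detect_spam subjects spam_words)

-- ===== LEMMAS AND PROOFS =====

-- A's inner loop computes: spam iff at least 2 words of the subject are spam words.
theorem pvInnerA_eq (spamL : List String) (ws : List String) (c : Int) (hc : c ≤ 1) :
    pvInnerA spamL ws c =
      if 2 ≤ c + (ws.countP (fun w => spamL.contains w) : Int) then "spam" else "not_spam" := by
  induction ws generalizing c with
  | nil => simp [pvInnerA]; omega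
  | cons w ws ih =>
    simp only [pvInnerA, List.countP_cons]
    by_cases hw : spamL.contains w = true
    · rw [if_pos hw, if_pos hw]
      by_cases h2 : (2:Int) ≤ c + 1
      · rw [if_pos h2, if_pos (by push_cast; omega)]
      · rw [if_neg h2, ih _ (by omega)]
        have harith : c + 1 + (ws.countP (fun w => spamL.contains w) : Int)
            = c + ((ws.countP (fun w => spamL.contains w) + 1 : Nat) : Int) := by push_cast; ring
        rw [harith]
    · rw [if_neg hw, if_neg hw, if_neg (by omega : ¬ (2:Int) ≤ c), ih _ hc]
      simp

-- indicator sum over a nodup list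
theorem sum_indicator (S : List String) (x : String) (hS : S.Nodup) :
    (S.map (fun w => if x = w then (1:Int) else 0)).sum = if x ∈ S then 1 else 0 := by
  induction S with
  | nil => simp
  | cons s S ih =>
    simp only [List.nodup_cons] at hS
    simp only [List.map_cons, List.sum_cons, ih hS.2, List.mem_cons]
    by_cases hx : x = s
    · subst hx
      simp [hS.1]
    · simp [hx]

-- summing each distinct spam word's occurrence count = counting subject words in the set
theorem sum_count_eq_countP (S : List String) (hS : S.Nodup) (ws : List String) :
    (S.map (fun w => (ws.count w : Int))).sum = (ws.countP (fun x => decide (x ∈ S)) : Int) := by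
  induction ws with
  | nil => simp
  | cons x t ih =>
    have hcount : ∀ w : String, ((x :: t).count w : Int) = (t.count w : Int) + (if x = w then 1 else 0) := by
      intro w
      rcases eq_or_ne x w with h | h
      · subst h; simp [List.count_cons_self]
      · simp [h]
    calc (S.map (fun w => ((x :: t).count w : Int))).sum
        = (S.map (fun w => (t.count w : Int) + (if x = w then 1 else 0))).sum := by
          exact congrArg List.sum (List.map_congr_left (fun w _ => hcount w))
      _ = (S.map (fun w => (t.count w : Int))).sum + (S.map (fun w => if x = w then (1:Int) else 0)).sum := by
          simp [List.sum_map_add]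
      _ = (t.countP (fun x => decide (x ∈ S)) : Int) + (if x ∈ S then 1 else 0) := by
          rw [ih, sum_indicator S x hS]
      _ = ((x :: t).countP (fun x => decide (x ∈ S)) : Int) := by
          by_cases hx : x ∈ S <;> simp [hx]

theorem detect_spam_spec_aux (subjects spam_words : List String) :
    detect_spam subjects spam_words = detect_spam_alt subjects spam_words := by
  unfold detect_spam detect_spam_alt
  rw [PySem.List.foldl_append_singleton_eq_map, PySem.List.foldl_append_singleton_eq_map]
  apply List.map_congr_left
  intro subject _
  set L := spam_words.map PySem.Str.lower with hL
  set ws := PySem.Str.split₀ (PySem.Str.lower subject) with hws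
  rw [pvInnerA_eq L ws 0 (by omega)]
  have hfreq : ∀ w : String,
      ((ws.foldl (fun d w => d.insert w (d.getD w 0 + 1)) (PySem.Dict.empty : PySem.Dict String Int)).getD w 0)
        = (ws.count w : Int) := by
    intro w
    rw [PySem.Dict.getD_foldl_insert_add_one]
    simp [PySem.Dict.empty, PySem.Dict.getD, PySem.Dict.get?]
  have hmap : ((PySem.Set.ofList L).map (fun w =>
      ((ws.foldl (fun d w => d.insert w (d.getD w 0 + 1)) (PySem.Dict.empty : PySem.Dict String Int)).getD w 0))).sum
      = (ws.countP (fun x => decide (x ∈ PySem.Set.ofList L)) : Int) := by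
    rw [show ((PySem.Set.ofList L).map (fun w =>
        ((ws.foldl (fun d w => d.insert w (d.getD w 0 + 1)) (PySem.Dict.empty : PySem.Dict String Int)).getD w 0)))
        = ((PySem.Set.ofList L).map (fun w => (ws.count w : Int))) from
      List.map_congr_left (fun w _ => hfreq w)]
    exact sum_count_eq_countP _ (PySem.Set.nodup_ofList L) ws
  have hpred : ws.countP (fun w => L.contains w) = ws.countP (fun x => decide (x ∈ PySem.Set.ofList L)) := by
    apply List.countP_congr
    intro w _
    simp [PySem.Set.mem_ofList]
  simp only [hmap, hpred, zero_add]

-- ===== VERDICT (by name: the statement is the Claim_ definition above) =====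
theorem detect_spam_spec : Claim_equal_detect_spam := by
  intro subjects spam_words _
  unfold Spec_detect_spam
  exact detect_spam_spec_aux subjects spam_words
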